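-- pv_equiv track=rewrite | github.com/nickderobertis/py-ex-latex | pyexlatex/table/models/texgen/alignment.py | _full_align_str_to_align_str_list
-- ===== SOURCE A (Python) =====
-- from typing import List, Tuple, Optional
--
-- def _full_align_str_to_align_str_list(align_str: str):
--     split_letters = ['l', 'c', 'r', '|', 'L', 'C', 'R', '.', 's', 'S', '@', '!', 'd', 'D']
--     out_list = []
--     collected_letters = ''
--     escape_pairs: List[Tuple[str, str]] = [('{', '}'), ('[', ']')]
--     escape_begins = [pair[0] for pair in escape_pairs]
--     escape_ends = [pair[1] for pair in escape_pairs]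
--     split = True
--     current_escape_end: str = ''
--
--     for letter in align_str:
--         # beginning inside of length str. don't split while inside
--         if letter in escape_begins:
--             split = False
--             # Determine escape ending character
--             for (beg, end) in escape_pairs:
--                 if letter == beg:
--                     current_escape_end = end
--                     break
--             if not current_escape_end:
--                 raise ValueError(f'matched {letter} as an escape character but no '
--                                  f'end character. escape pairs: {escape_pairs}')
--
--         # end of inside of length str. turn splitting back on
--         if letter == current_escape_end:
--             split = True
--             current_escape_end = ''
--         # if splitting, output what we've got so far and start a new item
--         if split and letter in split_letters:
--             out_list.append(collected_letters)
--             collected_letters = ''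
--         # if not splitting, add to current item
--         collected_letters += letter
--
--     # Clean up list from loop. Add last entry, and combine first two entries
--     out_list.append(collected_letters)
--     first_val = out_list.pop(0)
--     out_list[0] = first_val + out_list[0]
--
--     return out_list
-- ===== SOURCE B (Python) =====
-- def _full_align_str_to_align_str_list(align_str: str):
--     split_letters = 'lcr|LCR.sS@!dD'
--     # Pass 1: record the index of every split letter that occurs at top level
--     # (outside {...} / [...]), tracking only the currently expected closer.
--     esc = ''
--     bounds = []
--     for i, ch in enumerate(align_str):
--         if ch == '{':
--             esc = '}'
--         elif ch == '[':
--             esc = ']'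
--         elif ch == esc:
--             esc = ''
--         elif not esc and ch in split_letters:
--             bounds.append(i)
--     # Pass 2: slice the string so each piece starts at a boundary; the text
--     # before the first boundary belongs to the first piece.
--     starts = [0] + bounds[1:]
--     ends = bounds[1:] + [len(align_str)]
--     return [align_str[a:b] for a, b in zip(starts, ends)]
-- ===== Notes on version B (the rewrite author's own statement) =====
-- stated objective: alternative
-- what changed: B records the indices of the top-level split letters in one scan and then slices the original string at those boundaries (leading text merged into the first slice), instead of A's emit-as-you-go accumulator with split/escape flags and a final pop-and-merge cleanup. (Pre_ excludes the no-top-level-split-letter strings, where A raises IndexError and B returns [align_str].)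
import Mathlib
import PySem

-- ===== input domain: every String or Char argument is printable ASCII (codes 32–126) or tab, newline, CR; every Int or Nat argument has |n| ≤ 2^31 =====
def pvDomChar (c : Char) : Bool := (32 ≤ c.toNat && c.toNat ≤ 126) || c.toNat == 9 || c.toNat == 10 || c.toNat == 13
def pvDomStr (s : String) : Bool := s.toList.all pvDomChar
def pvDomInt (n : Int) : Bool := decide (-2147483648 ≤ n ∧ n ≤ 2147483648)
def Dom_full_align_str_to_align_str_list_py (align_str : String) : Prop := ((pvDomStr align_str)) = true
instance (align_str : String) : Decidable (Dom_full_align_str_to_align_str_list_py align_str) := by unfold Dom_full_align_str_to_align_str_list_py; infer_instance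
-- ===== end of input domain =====

-- B records the indices of the top-level split letters in one scan and then slices the
-- original string at those boundaries, instead of A's emit-as-you-go accumulator with a
-- final pop-and-merge cleanup (objective: alternative decomposition, same O(n) cost).

-- ===== PORT A =====
-- shared data constants (Python literals)
def splitLetters : List Char := ['l', 'c', 'r', '|', 'L', 'C', 'R', '.', 's', 'S', '@', '!', 'd', 'D']
def escapePairs : List (Char × Char) := [('{', '}'), ('[', ']')]

-- Python's current_escape_end is '' or a single closer; ported as Option Char (none = '').
-- One iteration of A's loop body, on the state (out_list, collected_letters, split, current_escape_end).
def A_step (st : List (List Char) × List Char × Bool × Option Char) (letter : Char) :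
    List (List Char) × List Char × Bool × Option Char :=
  let out := st.1
  let col := st.2.1
  -- if letter in escape_begins: split = False; inner for-with-break sets the closer
  -- (the 'raise ValueError' branch is unreachable: find? succeeds whenever letter is a begin)
  let se1 : Bool × Option Char :=
    if (escapePairs.map Prod.fst).contains letter then
      match escapePairs.find? (fun p => p.1 == letter) with
      | some pr => (false, some pr.2)
      | none => (false, st.2.2.2)
    else (st.2.2.1, st.2.2.2)
  -- if letter == current_escape_end: split = True; current_escape_end = ''
  let se2 : Bool × Option Char := if se1.2 == some letter then (true, none) else se1
  -- if split and letter in split_letters: append collected, start new item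
  let oc : List (List Char) × List Char :=
    if se2.1 && splitLetters.contains letter then (out ++ [col], []) else (out, col)
  (oc.1, oc.2 ++ [letter], se2.1, se2.2)

def full_align_str_to_align_str_list_py (align_str : String) : List String :=
  let st := align_str.toList.foldl A_step ([], [], true, none)
  let out := st.1 ++ [st.2.1]          -- out_list.append(collected_letters)
  match out with                        -- first_val = out_list.pop(0); out_list[0] = first_val + out_list[0]
  | first :: nxt :: rest => ((first ++ nxt) :: rest).map String.ofList
  | _ => []                             -- here Python raises IndexError (out_list empty after pop); excluded by Pre_

-- ===== PORT B =====
-- Pass 1 of Source B: indices of split letters occurring at top level (i is the enumerate counter).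
def bBounds : Nat → Option Char → List Char → List Nat
  | _, _, [] => []
  | i, esc, c :: cs =>
    if c = '{' then bBounds (i + 1) (some '}') cs
    else if c = '[' then bBounds (i + 1) (some ']') cs
    else if esc = some c then bBounds (i + 1) none cs
    else if esc = none ∧ splitLetters.contains c then i :: bBounds (i + 1) none cs
    else bBounds (i + 1) esc cs

def full_align_str_to_align_str_list_py_alt (align_str : String) : List String :=
  let cs := align_str.toList
  let bounds := bBounds 0 none cs
  let starts := 0 :: PySem.List.slice bounds (some 1) none          -- [0] + bounds[1:]
  let ends := PySem.List.slice bounds (some 1) none ++ [cs.length]  -- bounds[1:] + [len(align_str)]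
  (starts.zip ends).map (fun ab => String.ofList (PySem.List.slice cs (some (ab.1 : Int)) (some (ab.2 : Int))))

-- ===== PRECONDITION & SPEC =====
-- Pre_ excludes exactly the strings with no split letter outside brackets (e.g. '' or 'p{x}'):
-- there Python A raises IndexError at the final pop-and-merge (it returns no value), while B
-- returns the whole string as a one-element list. Whether such a letter occurs is inherently a
-- one-pass bracket-state condition, so Pre_ is that single Boolean scan (it builds neither
-- port's output).
def escStep (esc : Option Char) (c : Char) : Option Char :=
  if c = '{' then some '}' else if c = '[' then some ']' else if esc = some c then none else esc

def topSplitExists : Option Char → List Char → Bool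
  | _, [] => false
  | esc, c :: cs => (esc == none && splitLetters.contains c) || topSplitExists (escStep esc c) cs

def Pre_full_align_str_to_align_str_list_py (align_str : String) : Prop :=
  topSplitExists none align_str.toList = true
instance (align_str : String) : Decidable (Pre_full_align_str_to_align_str_list_py align_str) := by
  unfold Pre_full_align_str_to_align_str_list_py; infer_instance

def pvWitness_full_align_str_to_align_str_list_py : String := "l{3cm}c"

def Spec_full_align_str_to_align_str_list_py (align_str : String) (out : List String) : Prop := out = full_align_str_to_align_str_list_py_alt align_str
instance (align_str : String) (out : List String) : Decidable (Spec_full_align_str_to_align_str_list_py align_str out) := by unfold Spec_full_align_str_to_align_str_list_py; infer_instance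

-- ===== CLAIM (what is proved, stated in full; the proofs are below) =====
def Claim_equal_full_align_str_to_align_str_list_py : Prop := ∀ (align_str : String), Dom_full_align_str_to_align_str_list_py align_str → Pre_full_align_str_to_align_str_list_py align_str → Spec_full_align_str_to_align_str_list_py align_str (full_align_str_to_align_str_list_py align_str)

-- ===== LEMMAS AND PROOFS =====

-- proof-side reference: the list of collected segments (A's out_list ++ [collected]).
def segGroups : List Char → Option Char → List Char → List (List Char)
  | col, _, [] => [col]
  | col, esc, c :: cs =>
    if c = '{' then segGroups (col ++ [c]) (some '}') cs
    else if c = '[' then segGroups (col ++ [c]) (some ']') cs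
    else if esc = some c then segGroups (col ++ [c]) none cs
    else if esc = none ∧ splitLetters.contains c then col :: segGroups [c] none cs
    else segGroups (col ++ [c]) esc cs

-- the escape state A/B can actually reach
def EscOk (esc : Option Char) : Prop := esc = none ∨ esc = some '}' ∨ esc = some ']'

lemma segGroups_ne_nil (col : List Char) (esc : Option Char) (cs : List Char) :
    segGroups col esc cs ≠ [] := by
  induction cs generalizing col esc with
  | nil => simp [segGroups]
  | cons c cs ih => simp only [segGroups]; split_ifs <;> simp [ih]

lemma segGroups_flatten (cs : List Char) (col : List Char) (esc : Option Char) :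
    (segGroups col esc cs).flatten = col ++ cs := by
  induction cs generalizing col esc with
  | nil => simp [segGroups]
  | cons c cs ih => simp only [segGroups]; split_ifs <;> simp [ih]

-- A's loop equals segGroups
lemma foldl_A_eq (cs : List Char) (out : List (List Char)) (col : List Char) (esc : Option Char)
    (hesc : EscOk esc) :
    ((cs.foldl A_step (out, col, esc.isNone, esc)).1 ++ [(cs.foldl A_step (out, col, esc.isNone, esc)).2.1])
      = out ++ segGroups col esc cs := by
  induction cs generalizing out col esc with
  | nil => simp [segGroups]
  | cons c cs ih =>
    simp only [List.foldl_cons]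
    by_cases h1 : c = '{'
    · subst h1
      rw [show A_step (out, col, esc.isNone, esc) '{'
            = (out, col ++ ['{'], (some '}' : Option Char).isNone, some '}') from by
          simp [A_step, escapePairs, splitLetters]]
      rw [ih out (col ++ ['{']) (some '}') (Or.inr (Or.inl rfl))]
      simp [segGroups]
    · by_cases h2 : c = '['
      · subst h2
        rw [show A_step (out, col, esc.isNone, esc) '['
              = (out, col ++ ['['], (some ']' : Option Char).isNone, some ']') from by
            simp [A_step, escapePairs, splitLetters]]
        rw [ih out (col ++ ['[']) (some ']') (Or.inr (Or.inr rfl))]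
        simp [segGroups]
      · rcases hesc with rfl | rfl | rfl
        · by_cases h3 : c ∈ splitLetters
          · rw [show A_step (out, col, (none : Option Char).isNone, none) c
                  = (out ++ [col], [c], (none : Option Char).isNone, none) from by
                simp [A_step, escapePairs, h1, h2, h3]]
            rw [ih (out ++ [col]) [c] none (Or.inl rfl)]
            simp [segGroups, h1, h2, h3]
          · rw [show A_step (out, col, (none : Option Char).isNone, none) c
                  = (out, col ++ [c], (none : Option Char).isNone, none) from by
                simp [A_step, escapePairs, h1, h2, h3]]
            rw [ih out (col ++ [c]) none (Or.inl rfl)]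
            simp [segGroups, h1, h2, h3]
        · by_cases h3 : c = '}'
          · subst h3
            rw [show A_step (out, col, (some '}' : Option Char).isNone, some '}') '}'
                  = (out, col ++ ['}'], (none : Option Char).isNone, none) from by
                simp [A_step, escapePairs, splitLetters]]
            rw [ih out (col ++ ['}']) none (Or.inl rfl)]
            simp [segGroups]
          · rw [show A_step (out, col, (some '}' : Option Char).isNone, some '}') c
                  = (out, col ++ [c], (some '}' : Option Char).isNone, some '}') from by
                simp [A_step, escapePairs, Ne.symm h1, Ne.symm h2, Ne.symm h3]]
            rw [ih out (col ++ [c]) (some '}') (Or.inr (Or.inl rfl))]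
            simp [segGroups, h1, h2, Ne.symm h3]
        · by_cases h3 : c = ']'
          · subst h3
            rw [show A_step (out, col, (some ']' : Option Char).isNone, some ']') ']'
                  = (out, col ++ [']'], (none : Option Char).isNone, none) from by
                simp [A_step, escapePairs, splitLetters]]
            rw [ih out (col ++ [']']) none (Or.inl rfl)]
            simp [segGroups]
          · rw [show A_step (out, col, (some ']' : Option Char).isNone, some ']') c
                  = (out, col ++ [c], (some ']' : Option Char).isNone, some ']') from by
                simp [A_step, escapePairs, Ne.symm h1, Ne.symm h2, Ne.symm h3]]
            rw [ih out (col ++ [c]) (some ']') (Or.inr (Or.inr rfl))]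
            simp [segGroups, h1, h2, Ne.symm h3]

-- position list of the later groups
def startsAux : Nat → List (List Char) → List Nat
  | _, [] => []
  | _, [_] => []
  | n, g :: h :: t => (n + g.length) :: startsAux (n + g.length) (h :: t)

-- B's bounds are the start positions of the groups after the first
lemma bBounds_eq_startsAux (cs : List Char) (esc : Option Char) (col : List Char) (n : Nat) :
    bBounds (n + col.length) esc cs = startsAux n (segGroups col esc cs) := by
  induction cs generalizing col esc n with
  | nil => simp [bBounds, segGroups, startsAux]
  | cons c cs ih =>
    simp only [bBounds, segGroups]
    split_ifs with h1 h2 h3 h4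
    · have := ih (some '}') (col ++ [c]) n
      simpa [Nat.add_assoc] using this
    · have := ih (some ']') (col ++ [c]) n
      simpa [Nat.add_assoc] using this
    · have := ih none (col ++ [c]) n
      simpa [Nat.add_assoc] using this
    · obtain ⟨g, gs, hG⟩ := List.exists_cons_of_ne_nil (segGroups_ne_nil [c] none cs)
      have := ih none [c] (n + col.length)
      rw [hG] at this ⊢
      simp only [startsAux, List.length_cons, List.length_nil] at this ⊢
      rw [← this]
    · have := ih esc (col ++ [c]) n
      simpa [Nat.add_assoc] using this

lemma startsAux_merge (n : Nat) (f s : List Char) (rest : List (List Char)) :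
    startsAux n ((f ++ s) :: rest) = startsAux (n + f.length) (s :: rest) := by
  cases rest with
  | nil => simp [startsAux]
  | cons r t => simp [startsAux, Nat.add_assoc]

-- slicing any group list back out of the flattened string
lemma zip_slices (gs : List (List Char)) (pre cs : List Char) (hne : gs ≠ [])
    (hcs : cs = pre ++ gs.flatten) :
    ((pre.length :: startsAux pre.length gs).zip (startsAux pre.length gs ++ [cs.length])).map
        (fun ab => String.ofList (PySem.List.slice cs (some (ab.1 : Int)) (some (ab.2 : Int))))
      = gs.map String.ofList := by
  induction gs generalizing pre with
  | nil => exact absurd rfl hne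
  | cons g gs ih =>
    cases gs with
    | nil =>
      simp only [startsAux, List.nil_append, List.zip_cons_cons, List.zip_nil_right,
        List.map_cons, List.map_nil]
      rw [PySem.List.slice_natCast, hcs]
      simp
    | cons h t =>
      simp only [startsAux, List.cons_append, List.zip_cons_cons, List.map_cons]
      congr 1
      · rw [PySem.List.slice_natCast, hcs]
        simp only [List.flatten_cons, Nat.add_sub_cancel_left]
        rw [List.drop_left, List.take_left]
      · have hcs' : cs = (pre ++ g) ++ (h :: t).flatten := by
          simp [hcs]
        have := ih (pre ++ g) (by simp) hcs'
        simpa using this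

lemma topSplit_iff_bBounds (cs : List Char) (esc : Option Char) (i : Nat) :
    topSplitExists esc cs = true ↔ bBounds i esc cs ≠ [] := by
  induction cs generalizing esc i with
  | nil => simp [topSplitExists, bBounds]
  | cons c cs ih =>
    simp only [topSplitExists, bBounds, escStep]
    split_ifs with h1 h2 h3 h4
    · subst h1; simpa [splitLetters] using ih (some '}') (i + 1)
    · subst h2; simpa [splitLetters] using ih (some ']') (i + 1)
    · subst h3; simpa using ih none (i + 1)
    · simp [h4.1]
      exact Or.inl (by simpa using h4.2)
    · rcases Option.eq_none_or_eq_some esc with he | ⟨e, he⟩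
      · subst he
        have hns : c ∉ splitLetters := fun h => h4 ⟨rfl, by simpa using h⟩
        simpa [hns] using ih none (i + 1)
      · subst he
        simpa using ih (some e) (i + 1)

lemma startsAux_ne_nil_shape (n : Nat) (gs : List (List Char)) (h : startsAux n gs ≠ []) :
    ∃ f s rest, gs = f :: s :: rest := by
  match gs with
  | [] => simp [startsAux] at h
  | [g] => simp [startsAux] at h
  | f :: s :: rest => exact ⟨f, s, rest, rfl⟩

-- ===== VERDICT (by name: the statement is the Claim_ definition above) =====
theorem full_align_str_to_align_str_list_py_spec : Claim_equal_full_align_str_to_align_str_list_py := by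
  intro s _ hpre
  unfold Spec_full_align_str_to_align_str_list_py
  unfold Pre_full_align_str_to_align_str_list_py at hpre
  have hb0 : bBounds 0 none s.toList ≠ [] := (topSplit_iff_bBounds s.toList none 0).mp hpre
  have hb2 : bBounds 0 none s.toList = startsAux 0 (segGroups [] none s.toList) := by
    simpa using bBounds_eq_startsAux s.toList none [] 0
  obtain ⟨f, g, rest, hG⟩ := startsAux_ne_nil_shape 0 _ (by rw [← hb2]; exact hb0)
  have hA := foldl_A_eq s.toList [] [] none (Or.inl rfl)
  rw [hG] at hA
  simp only [Option.isNone_none, List.nil_append] at hA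
  have hflat : s.toList = [] ++ ((f ++ g) :: rest).flatten := by
    have hfl := segGroups_flatten s.toList [] none
    rw [hG] at hfl
    simp only [List.nil_append, List.flatten_cons] at hfl ⊢
    rw [← hfl, List.append_assoc]
  have hz := zip_slices ((f ++ g) :: rest) [] s.toList (by simp) hflat
  rw [startsAux_merge] at hz
  simp only [List.length_nil, Nat.zero_add] at hz
  simp only [full_align_str_to_align_str_list_py, full_align_str_to_align_str_list_py_alt]
  rw [hA]
  rw [hb2, hG]
  simp only [startsAux, Nat.zero_add, PySem.List.slice_from_one, List.tail_cons]
  exact hz.symm
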